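-- pv_equiv track=rewrite | github.com/rmotadutra/PFG_2020 | codes/distribuicao.py | local_litholigic_data
-- ===== SOURCE A (Python) =====
-- def local_litholigic_data(lithology,litho_info):
--
--     lithos_index = {}
--
--     m = len(lithology)
--     for j in litho_info:
--         index = []
--         for i in range(m):
--             if int(lithology[i]) == j:
--                 index.append(i)
--         lithos_index[j] = index
--
--     return lithos_index
-- ===== SOURCE B (Python) =====
-- def local_litholigic_data(lithology, litho_info):
--     # one pass over the samples bucketing indices by value, then select keys
--     buckets = {}
--     for i, v in enumerate(lithology):
--         buckets.setdefault(int(v), []).append(i)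
--     return {j: buckets.get(j, []) for j in litho_info}
-- ===== Notes on version B (the rewrite author's own statement) =====
-- stated objective: faster
-- what changed: Replaces the per-key rescan of the whole lithology list with a single bucketing pass over enumerate(lithology) followed by O(1) dict lookups per requested key.
import Mathlib
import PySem

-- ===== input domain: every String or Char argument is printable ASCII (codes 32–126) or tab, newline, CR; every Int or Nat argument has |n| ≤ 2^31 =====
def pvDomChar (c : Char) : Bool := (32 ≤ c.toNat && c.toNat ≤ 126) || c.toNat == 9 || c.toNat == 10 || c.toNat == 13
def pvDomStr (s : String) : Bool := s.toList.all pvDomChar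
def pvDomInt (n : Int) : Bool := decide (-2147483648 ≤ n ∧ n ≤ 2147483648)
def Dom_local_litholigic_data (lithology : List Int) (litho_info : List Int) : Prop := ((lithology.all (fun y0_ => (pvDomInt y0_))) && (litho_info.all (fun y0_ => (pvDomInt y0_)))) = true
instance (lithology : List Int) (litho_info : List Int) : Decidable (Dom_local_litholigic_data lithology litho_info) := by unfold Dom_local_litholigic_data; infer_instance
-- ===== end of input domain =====

-- B replaces A's per-key rescan of lithology with one bucketing pass plus per-key lookups (faster, asymptotic).

-- ===== PORT A =====
-- inner loop: for i in range(m): if int(lithology[i]) == j: index.append(i)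
-- (lithology[i] ported with pyGetD: i always lies in range 0..m-1, so the default is never used — exact)
def local_litholigic_data (lithology : List Int) (litho_info : List Int) : List (Int × List Int) :=
  let m : Int := lithology.length
  (litho_info.foldl (fun d j =>
      let index : List Int :=
        (PySem.List.pyRange 0 m 1).foldl
          (fun acc i => if PySem.List.pyGetD lithology i 0 == j then acc ++ [i] else acc) []
      d.insert j index)
    PySem.Dict.empty).items

-- ===== PORT B =====
def local_litholigic_data_alt (lithology : List Int) (litho_info : List Int) : List (Int × List Int) :=
  let buckets : PySem.Dict Int (List Int) :=
    (PySem.List.enumerate lithology 0).foldl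
      (fun d p => d.modify p.2 [] (fun l => l ++ [p.1])) PySem.Dict.empty
  (litho_info.foldl (fun d j => d.insert j (buckets.getD j [])) PySem.Dict.empty).items

-- ===== PRECONDITION & SPEC =====
def Spec_local_litholigic_data (lithology : List Int) (litho_info : List Int) (out : List (Int × List Int)) : Prop := out = local_litholigic_data_alt lithology litho_info
instance (lithology : List Int) (litho_info : List Int) (out : List (Int × List Int)) : Decidable (Spec_local_litholigic_data lithology litho_info out) := by unfold Spec_local_litholigic_data; infer_instance

-- ===== CLAIM (what is proved, stated in full; the proofs are below) =====
def Claim_equal_local_litholigic_data : Prop := ∀ (lithology : List Int) (litho_info : List Int), Dom_local_litholigic_data lithology litho_info → Spec_local_litholigic_data lithology litho_info (local_litholigic_data lithology litho_info)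

-- ===== LEMMAS AND PROOFS =====

-- A's inner scan for key j, rewritten through enumerate: the matching indices in order.
theorem pvA_index_eq (lithology : List Int) (j : Int) :
    (PySem.List.pyRange 0 (lithology.length : Int) 1).foldl
      (fun acc i => if PySem.List.pyGetD lithology i 0 == j then acc ++ [i] else acc) []
    = ((PySem.List.enumerate lithology 0).filter (fun p => p.2 == j)).map (fun p => p.1) := by
  rw [show ((PySem.List.enumerate lithology 0).filter (fun p => p.2 == j)).map (fun p => p.1)
      = (PySem.List.enumerate lithology 0).foldl
          (fun acc p => if p.2 == j then acc ++ [p.1] else acc) [] from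
    (PySem.List.foldl_append_if (fun p : Int × Int => p.2 == j) (fun p => p.1)
      (PySem.List.enumerate lithology 0) []).symm]
  rw [PySem.List.enumerate_eq_map_pyRange lithology 0, List.foldl_map]
  simp

-- B's bucket for key j is exactly that list of matching indices.
theorem pvB_bucket_eq (lithology : List Int) (j : Int) :
    ((PySem.List.enumerate lithology 0).foldl
        (fun d p => d.modify p.2 [] (fun l => l ++ [p.1])) PySem.Dict.empty).getD j []
    = ((PySem.List.enumerate lithology 0).filter (fun p => p.2 == j)).map (fun p => p.1) := by
  have h := PySem.Dict.getD_foldl_modify_append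
      ((PySem.List.enumerate lithology 0).map (fun p => (p.2, p.1))) PySem.Dict.empty j
  simp only [List.foldl_map] at h
  rw [h]
  simp [List.filter_map, Function.comp_def]

-- ===== VERDICT (by name: the statement is the Claim_ definition above) =====
theorem local_litholigic_data_spec : Claim_equal_local_litholigic_data := by
  intro lithology litho_info _
  unfold Spec_local_litholigic_data local_litholigic_data local_litholigic_data_alt
  have h : ∀ (d : PySem.Dict Int (List Int)) (j : Int), j ∈ litho_info →
      d.insert j ((PySem.List.pyRange 0 (lithology.length : Int) 1).foldl
        (fun acc i => if PySem.List.pyGetD lithology i 0 == j then acc ++ [i] else acc) [])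
      = d.insert j (((PySem.List.enumerate lithology 0).foldl
          (fun d p => d.modify p.2 [] (fun l => l ++ [p.1])) PySem.Dict.empty).getD j []) := by
    intro d j _
    rw [pvA_index_eq, pvB_bucket_eq]
  simpa using congrArg PySem.Dict.items
    (PySem.List.foldl_congr_mem litho_info _ _ PySem.Dict.empty h)
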